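-- pv_equiv track=rewrite | github.com/Elior-S/targil1- | main.py | dict_3_add
-- ===== SOURCE A (Python) =====
-- def dict_3_add(d1: dict, d2: dict, d3: dict) -> dict:
--     """ממזג שלושה מילונים לפי דרישת התרגיל (tuple של כל הערכים ללא כפילויות)"""
--     all_keys = set(d1.keys()) | set(d2.keys()) | set(d3.keys())
--     new_dict = {}
--     for key in all_keys:
--         values = []
--         for d in (d1, d2, d3):
--             if key in d and d[key] not in values:
--                 values.append(d[key])
--         new_dict[key] = tuple(values)
--     return new_dict
-- ===== SOURCE B (Python) =====
-- def dict_3_add(d1: dict, d2: dict, d3: dict) -> dict: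
--     """Single transposed pass over the three dicts' items (no key-set phase)."""
--     new_dict = {}
--     for d in (d1, d2, d3):
--         for key, val in d.items():
--             if key not in new_dict:
--                 new_dict[key] = [val]
--             elif val not in new_dict[key]:
--                 new_dict[key].append(val)
--     return {k: tuple(v) for k, v in new_dict.items()}
-- ===== Notes on version B (the rewrite author's own statement) =====
-- stated objective: alternative
-- what changed: B drops A's union-of-key-sets phase and per-key probing of all three dicts: it makes one transposed pass over the items of d1, d2, d3, accumulating each key's distinct values in a dict of lists built incrementally, then converts the lists to tuples.
import Mathlib
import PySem

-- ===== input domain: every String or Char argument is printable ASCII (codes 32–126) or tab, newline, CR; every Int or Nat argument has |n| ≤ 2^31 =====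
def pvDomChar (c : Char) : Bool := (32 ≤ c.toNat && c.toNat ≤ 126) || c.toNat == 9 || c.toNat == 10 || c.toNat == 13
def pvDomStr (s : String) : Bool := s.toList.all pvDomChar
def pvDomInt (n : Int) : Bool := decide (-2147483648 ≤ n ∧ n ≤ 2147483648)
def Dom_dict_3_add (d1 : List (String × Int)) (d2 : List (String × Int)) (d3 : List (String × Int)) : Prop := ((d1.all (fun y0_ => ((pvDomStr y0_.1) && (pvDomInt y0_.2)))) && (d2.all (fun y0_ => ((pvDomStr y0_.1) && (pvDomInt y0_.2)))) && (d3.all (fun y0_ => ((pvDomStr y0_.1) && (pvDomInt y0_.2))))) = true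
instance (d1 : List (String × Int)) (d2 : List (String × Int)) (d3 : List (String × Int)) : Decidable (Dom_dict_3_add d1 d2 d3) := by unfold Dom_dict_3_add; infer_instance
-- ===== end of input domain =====

-- B replaces A's key-set phase + per-key lookups by one transposed pass over the three dicts' items (alternative decomposition, same result).
-- Python A iterates over a hash-ordered set of keys; the ports use first-occurrence key order, and outputs are compared as dicts (order ignored).

-- ===== PORT A =====
-- inner loop of A: 'for d in (d1, d2, d3): if key in d and d[key] not in values: values.append(d[key])'
def pvVals (D1 D2 D3 : PySem.Dict String Int) (key : String) : List Int :=
  [D1, D2, D3].foldl (fun vs d =>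
    match d.get? key with
    | some v => if vs.contains v then vs else vs ++ [v]
    | none => vs) []

def dict_3_add (d1 : List (String × Int)) (d2 : List (String × Int)) (d3 : List (String × Int)) : List (String × List Int) :=
  let D1 := PySem.Dict.ofList d1
  let D2 := PySem.Dict.ofList d2
  let D3 := PySem.Dict.ofList d3
  -- all_keys = set(d1.keys()) | set(d2.keys()) | set(d3.keys())
  let allKeys : PySem.Set String :=
    PySem.Set.union (PySem.Set.union (PySem.Set.ofList D1.keys) (PySem.Set.ofList D2.keys)) (PySem.Set.ofList D3.keys)
  -- for key in all_keys: new_dict[key] = tuple(values)   (tuple of ints = List Int)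
  (allKeys.foldl (fun nd key => nd.insert key (pvVals D1 D2 D3 key)) PySem.Dict.empty).items

-- ===== PORT B =====
-- body of B's inner loop: if key not in new_dict: new_dict[key]=[val] elif val not in new_dict[key]: append(val)
def pvBStep (nd : PySem.Dict String (List Int)) (kv : String × Int) : PySem.Dict String (List Int) :=
  if nd.contains kv.1 = false then nd.insert kv.1 [kv.2]
  else if (nd.getD kv.1 []).contains kv.2 then nd
  else nd.modify kv.1 [] (fun vs => vs ++ [kv.2])

def dict_3_add_alt (d1 : List (String × Int)) (d2 : List (String × Int)) (d3 : List (String × Int)) : List (String × List Int) :=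
  let D1 := PySem.Dict.ofList d1
  let D2 := PySem.Dict.ofList d2
  let D3 := PySem.Dict.ofList d3
  let nd := [D1, D2, D3].foldl (fun nd d => d.items.foldl pvBStep nd) PySem.Dict.empty
  -- {k: tuple(v) for k, v in new_dict.items()}: distinct keys in order, so the new dict's items are this map
  nd.items.map (fun kv => (kv.1, kv.2))

-- ===== PRECONDITION & SPEC =====
def Spec_dict_3_add (d1 : List (String × Int)) (d2 : List (String × Int)) (d3 : List (String × Int)) (out : List (String × List Int)) : Prop := out = dict_3_add_alt d1 d2 d3
instance (d1 : List (String × Int)) (d2 : List (String × Int)) (d3 : List (String × Int)) (out : List (String × List Int)) : Decidable (Spec_dict_3_add d1 d2 d3 out) := by unfold Spec_dict_3_add; infer_instance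

-- ===== CLAIM (what is proved, stated in full; the proofs are below) =====
def Claim_equal_dict_3_add : Prop := ∀ (d1 : List (String × Int)) (d2 : List (String × Int)) (d3 : List (String × Int)), Dom_dict_3_add d1 d2 d3 → Spec_dict_3_add d1 d2 d3 (dict_3_add d1 d2 d3)

-- ===== LEMMAS AND PROOFS =====

-- 'values' after considering one dict's value for the key (A's loop body, curried)
def pvPush (vs : List Int) (o : Option Int) : List Int :=
  match o with
  | some v => if vs.contains v then vs else vs ++ [v]
  | none => vs

lemma pvVals_eq (D1 D2 D3 : PySem.Dict String Int) (k : String) :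
    pvVals D1 D2 D3 k = pvPush (pvPush (pvPush [] (D1.get? k)) (D2.get? k)) (D3.get? k) := rfl

lemma pvOfList_nodup {α : Type} [BEq α] [LawfulBEq α] (xs : List α) (h : xs.Nodup) :
    PySem.Set.ofList xs = xs := by
  have := PySem.Set.update_eq_append_of_disjoint (s := PySem.Set.empty) (xs := xs) h (by simp [PySem.Set.empty])
  simpa [PySem.Set.update_empty, PySem.Set.empty] using this

lemma pvUpdate_ofList {α : Type} [BEq α] [LawfulBEq α] (s : PySem.Set α) (xs : List α) :
    PySem.Set.update s (PySem.Set.ofList xs) = PySem.Set.update s xs := by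
  rw [PySem.Set.update_eq_append_filter, PySem.Set.update_eq_append_filter,
    pvOfList_nodup (PySem.Set.ofList xs) (PySem.Set.nodup_ofList xs)]

lemma pvBStep_keys (nd : PySem.Dict String (List Int)) (kv : String × Int) :
    (pvBStep nd kv).keys = PySem.Set.add nd.keys kv.1 := by
  by_cases h : nd.contains kv.1 = true
  · have hm : kv.1 ∈ nd.keys := (PySem.Dict.contains_iff_mem_keys nd kv.1).mp h
    have hadd : PySem.Set.add nd.keys kv.1 = nd.keys := PySem.Set.add_of_mem hm
    by_cases hv : kv.2 ∈ nd.getD kv.1 []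
    · simp [pvBStep, h, hv, hadd]
    · simp [pvBStep, h, hv, hadd, PySem.Dict.keys_modify,
        PySem.Dict.keys_insert_of_contains _ _ h]
  · have h' : nd.contains kv.1 = false := by simpa using h
    have hm : kv.1 ∉ nd.keys := fun hmem => by
      simp [(PySem.Dict.contains_iff_mem_keys nd kv.1).mpr hmem] at h'
    simp [pvBStep, h', PySem.Dict.keys_insert_of_not_contains _ _ h', PySem.Set.add_of_not_mem hm]

lemma pvPass_keys (l : List (String × Int)) (nd : PySem.Dict String (List Int)) :
    (l.foldl pvBStep nd).keys = PySem.Set.update nd.keys (l.map (·.1)) := by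
  induction l generalizing nd with
  | nil => rfl
  | cons p rest ih =>
    simp only [List.foldl_cons, List.map_cons, PySem.Set.update_cons, ih, pvBStep_keys]

lemma pvBStep_getD (nd : PySem.Dict String (List Int)) (kv : String × Int) (k : String) :
    (pvBStep nd kv).getD k [] =
      if k = kv.1 then pvPush (nd.getD kv.1 []) (some kv.2) else nd.getD k [] := by
  by_cases h : nd.contains kv.1 = true
  · by_cases hv : kv.2 ∈ nd.getD kv.1 []
    · by_cases hk : k = kv.1 <;> simp [pvBStep, pvPush, h, hv, hk]
    · by_cases hk : k = kv.1 <;>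
        simp [pvBStep, pvPush, h, hv, hk, PySem.Dict.getD_modify]
  · have h' : nd.contains kv.1 = false := by simpa using h
    have h0 : nd.getD kv.1 [] = [] := PySem.Dict.getD_of_not_contains nd [] h'
    by_cases hk : k = kv.1 <;>
      simp [pvBStep, pvPush, h', hk, PySem.Dict.getD_insert, h0]

lemma pvPass_getD (l : List (String × Int)) (hl : (l.map (·.1)).Nodup)
    (nd : PySem.Dict String (List Int)) (k : String) :
    (l.foldl pvBStep nd).getD k [] =
      pvPush (nd.getD k []) ((l.find? (fun p => p.1 == k)).map (·.2)) := by
  induction l generalizing nd with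
  | nil => simp [pvPush]
  | cons p rest ih =>
    have hnd : p.1 ∉ rest.map (·.1) ∧ (rest.map (·.1)).Nodup := by
      simpa using hl
    simp only [List.foldl_cons]
    rw [ih hnd.2, pvBStep_getD]
    by_cases hk : k = p.1
    · subst hk
      have hnone : rest.find? (fun q => q.1 == p.1) = none := by
        rw [List.find?_eq_none]
        intro q hq hbeq
        have hqmem : q.1 ∈ rest.map (fun x => x.1) := List.mem_map_of_mem hq
        rw [eq_of_beq hbeq] at hqmem
        exact hnd.1 hqmem
      simp [hnone, pvPush]
    · have hbeq : (p.1 == k) = false := by simpa using Ne.symm hk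
      simp [hk, hbeq]

lemma pvGetFind (D : PySem.Dict String Int) (k : String) :
    (D.items.find? (fun p => p.1 == k)).map (·.2) = D.get? k := rfl

theorem dict_3_add_spec : Claim_equal_dict_3_add := by
  intro d1 d2 d3 _
  unfold Spec_dict_3_add dict_3_add dict_3_add_alt
  simp only [List.foldl_cons, List.foldl_nil]
  -- abbreviations
  have n1 := PySem.Dict.nodup_keys_ofList (κ := String) (ν := Int) d1
  have n2 := PySem.Dict.nodup_keys_ofList (κ := String) (ν := Int) d2
  have n3 := PySem.Dict.nodup_keys_ofList (κ := String) (ν := Int) d3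
  set D1 := PySem.Dict.ofList d1 with hD1
  set D2 := PySem.Dict.ofList d2 with hD2
  set D3 := PySem.Dict.ofList d3 with hD3
  -- the common key list, in first-occurrence order
  have hkeysA :
      PySem.Set.union (PySem.Set.union (PySem.Set.ofList D1.keys) (PySem.Set.ofList D2.keys)) (PySem.Set.ofList D3.keys)
        = PySem.Set.update (PySem.Set.update D1.keys D2.keys) D3.keys := by
    show PySem.Set.update (PySem.Set.update (PySem.Set.ofList D1.keys) (PySem.Set.ofList D2.keys)) (PySem.Set.ofList D3.keys)
        = PySem.Set.update (PySem.Set.update D1.keys D2.keys) D3.keys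
    rw [pvOfList_nodup D1.keys n1, pvUpdate_ofList, pvUpdate_ofList]
  set K : List String := PySem.Set.update (PySem.Set.update D1.keys D2.keys) D3.keys with hK
  have hKnodup : K.Nodup := PySem.Set.nodup_update _ _ (PySem.Set.nodup_update _ _ n1)
  -- A's side: inserting fresh distinct keys into an empty dict appends in order
  have hA : (K.foldl (fun nd key => nd.insert key (pvVals D1 D2 D3 key)) PySem.Dict.empty).items
      = K.map (fun k => (k, pvVals D1 D2 D3 k)) := by
    have := PySem.Dict.items_foldl_insert_fresh (l := K) (k := fun x => x)
      (v := fun x => pvVals D1 D2 D3 x) (d := PySem.Dict.empty)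
      (fun a _ => PySem.Dict.contains_empty a) (by simpa using hKnodup)
    simpa [PySem.Dict.empty] using this
  -- B's side
  set nd := D3.items.foldl pvBStep (D2.items.foldl pvBStep (D1.items.foldl pvBStep PySem.Dict.empty)) with hnd
  have hndkeys : nd.keys = K := by
    rw [hnd, pvPass_keys, pvPass_keys, pvPass_keys]
    show PySem.Set.update (PySem.Set.update (PySem.Set.update PySem.Set.empty D1.keys) D2.keys) D3.keys = K
    rw [PySem.Set.update_empty, pvOfList_nodup D1.keys n1, hK]
  have hndnodup : nd.keys.Nodup := hndkeys ▸ hKnodup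
  have hndgetD : ∀ k : String, nd.getD k [] = pvVals D1 D2 D3 k := by
    intro k
    rw [hnd, pvPass_getD _ n3, pvPass_getD _ n2, pvPass_getD _ n1,
      pvGetFind, pvGetFind, pvGetFind, pvVals_eq]
    simp [PySem.Dict.getD_empty]
  have hB : nd.items.map (fun kv => (kv.1, kv.2)) = K.map (fun k => (k, pvVals D1 D2 D3 k)) := by
    rw [PySem.Dict.items_eq_map_keys nd hndnodup ([] : List Int), hndkeys]
    simp [hndgetD]
  rw [hkeysA, hA, hB]
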